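-- pv_equiv track=rewrite | github.com/YangLiu14/Open-World-Tracking | trackers/offline_tracker.py | refine_cluster
-- ===== SOURCE A (Python) =====
-- def refine_cluster(clustered_seqs, sequence):
--     for c_seq in clustered_seqs:
--         for t_id in sequence:
--             if t_id not in c_seq:
--                 break
--             else:
--                 c_seq.remove(t_id)
--
--     return clustered_seqs
-- ===== SOURCE B (Python) =====
-- def refine_cluster(clustered_seqs, sequence):
--     for c_seq in clustered_seqs:
--         avail = {}
--         for v in c_seq:
--             avail[v] = avail.get(v, 0) + 1
--         consumed = {}
--         for t_id in sequence:
--             if consumed.get(t_id, 0) + 1 > avail.get(t_id, 0):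
--                 break
--             consumed[t_id] = consumed.get(t_id, 0) + 1
--         new = []
--         for v in c_seq:
--             k = consumed.get(v, 0)
--             if k > 0:
--                 consumed[v] = k - 1
--             else:
--                 new.append(v)
--         c_seq[:] = new
--     return clustered_seqs
-- ===== Notes on version B (the rewrite author's own statement) =====
-- stated objective: alternative
-- what changed: Replaces A's per-element 'in'/'remove' scans of each cluster with one availability count table per cluster, a single counting pass over the sequence to determine how many occurrences of each id get removed, and one rebuild pass over the cluster dropping the first consumed[v] occurrences of each value; each inner list is still mutated in place via c_seq[:] = new.
import Mathlib
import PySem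

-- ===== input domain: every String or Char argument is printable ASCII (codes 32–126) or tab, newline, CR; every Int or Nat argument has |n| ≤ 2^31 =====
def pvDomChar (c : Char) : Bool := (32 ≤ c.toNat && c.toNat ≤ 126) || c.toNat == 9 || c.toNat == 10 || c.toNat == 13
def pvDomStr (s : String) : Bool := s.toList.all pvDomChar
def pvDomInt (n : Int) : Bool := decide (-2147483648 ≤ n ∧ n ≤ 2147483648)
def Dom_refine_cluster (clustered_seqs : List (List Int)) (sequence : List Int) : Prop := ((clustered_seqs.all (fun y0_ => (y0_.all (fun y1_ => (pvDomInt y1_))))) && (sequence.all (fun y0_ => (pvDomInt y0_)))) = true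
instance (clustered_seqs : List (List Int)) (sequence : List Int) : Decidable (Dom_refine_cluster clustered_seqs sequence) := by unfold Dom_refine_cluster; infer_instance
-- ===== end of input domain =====

-- B replaces A's repeated membership/remove scans by count tables (avail/consumed dicts)
-- and one rebuild pass per cluster (an alternative algorithm, not measured faster); both
-- Pythons mutate each inner list in place identically, and the equivalence proved here is
-- about the returned value.

-- ===== PORT A =====
-- inner 'for t_id in sequence: if t_id not in c_seq: break else c_seq.remove(t_id)'
def pvRemoveLoop (c : List Int) (seq : List Int) : List Int :=
  match seq with
  | [] => c
  | t :: rest =>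
    if c.contains t = false then c
    else pvRemoveLoop ((PySem.List.remove? c t).getD c) rest

def refine_cluster (clustered_seqs : List (List Int)) (sequence : List Int) : List (List Int) :=
  clustered_seqs.map (fun c_seq => pvRemoveLoop c_seq sequence)

-- ===== PORT B =====
-- avail = {}; for v in c_seq: avail[v] = avail.get(v, 0) + 1
def pvAvail (c : List Int) : PySem.Dict Int Int :=
  c.foldl (fun d v => d.insert v (d.getD v 0 + 1)) PySem.Dict.empty

-- for t_id in sequence: if consumed.get(t_id,0)+1 > avail.get(t_id,0): break; consumed[t_id] += 1
def pvConsumeLoop (avail : PySem.Dict Int Int) (consumed : PySem.Dict Int Int) (seq : List Int) : PySem.Dict Int Int :=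
  match seq with
  | [] => consumed
  | t :: rest =>
    if consumed.getD t 0 + 1 > avail.getD t 0 then consumed
    else pvConsumeLoop avail (consumed.insert t (consumed.getD t 0 + 1)) rest

-- for v in c_seq: k = consumed.get(v,0); if k > 0: consumed[v] = k-1 else: new.append(v)
def pvRebuildLoop (c : List Int) (consumed : PySem.Dict Int Int) : List Int :=
  match c with
  | [] => []
  | v :: rest =>
    let k := consumed.getD v 0
    if k > 0 then pvRebuildLoop rest (consumed.insert v (k - 1))
    else v :: pvRebuildLoop rest consumed

def refine_cluster_alt (clustered_seqs : List (List Int)) (sequence : List Int) : List (List Int) :=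
  clustered_seqs.map (fun c_seq =>
    pvRebuildLoop c_seq (pvConsumeLoop (pvAvail c_seq) PySem.Dict.empty sequence))

-- ===== PRECONDITION & SPEC =====
def Spec_refine_cluster (clustered_seqs : List (List Int)) (sequence : List Int) (out : List (List Int)) : Prop := out = refine_cluster_alt clustered_seqs sequence
instance (clustered_seqs : List (List Int)) (sequence : List Int) (out : List (List Int)) : Decidable (Spec_refine_cluster clustered_seqs sequence out) := by unfold Spec_refine_cluster; infer_instance

-- ===== CLAIM (what is proved, stated in full; the proofs are below) =====
def Claim_equal_refine_cluster : Prop := ∀ (clustered_seqs : List (List Int)) (sequence : List Int), Dom_refine_cluster clustered_seqs sequence → Spec_refine_cluster clustered_seqs sequence (refine_cluster clustered_seqs sequence)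

-- ===== LEMMAS AND PROOFS =====

-- Proof-side functional models (counters as Int → Nat).
def incF (f : Int → Nat) (t : Int) : Int → Nat := fun v => if v = t then f t + 1 else f v
def decF (f : Int → Nat) (t : Int) : Int → Nat := fun v => if v = t then f t - 1 else f v

def rebuildF (c : List Int) (f : Int → Nat) : List Int :=
  match c with
  | [] => []
  | v :: rest => if 0 < f v then rebuildF rest (decF f v) else v :: rebuildF rest f

def consumeF (cnt : Int → Nat) (f : Int → Nat) (seq : List Int) : Int → Nat :=
  match seq with
  | [] => f
  | t :: rest => if cnt t < f t + 1 then f else consumeF cnt (incF f t) rest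

theorem rebuildF_congr (c : List Int) (f g : Int → Nat) (h : ∀ v, f v = g v) :
    rebuildF c f = rebuildF c g := by
  induction c generalizing f g with
  | nil => rfl
  | cons v rest ih =>
    simp only [rebuildF, h v]
    split_ifs with hv
    · exact ih _ _ (fun w => by simp only [decF, h])
    · exact congrArg _ (ih _ _ h)

-- Bridge: the avail dict is the count table.
theorem pvAvail_getD (c : List Int) (v : Int) : (pvAvail c).getD v 0 = (c.count v : Int) := by
  simpa [pvAvail] using PySem.Dict.getD_foldl_insert_add_one (l := c) (d := PySem.Dict.empty) (v := v)

-- Bridge: the consume loop computes consumeF (pointwise, as Nats).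
theorem pvConsumeLoop_getD (c : List Int) (seq : List Int) (d : PySem.Dict Int Int)
    (g : Int → Nat) (hd : ∀ v, d.getD v 0 = (g v : Int)) :
    ∀ v, (pvConsumeLoop (pvAvail c) d seq).getD v 0 = (consumeF (fun v => c.count v) g seq v : Int) := by
  induction seq generalizing d g with
  | nil => exact hd
  | cons t rest ih =>
    intro v
    simp only [pvConsumeLoop, consumeF, hd t, pvAvail_getD]
    have hcond : ((c.count t : Int) < (g t : Int) + 1) ↔ (c.count t < g t + 1) := by
      constructor <;> intro h <;> omega
    split_ifs with h1 h2 h2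
    · exact hd v
    · exact absurd (hcond.mp h1) h2
    · exact absurd (hcond.mpr h2) h1
    · refine ih _ (incF g t) (fun w => ?_) v
      simp only [PySem.Dict.getD_insert, incF, hd]
      split_ifs <;> omega

-- Bridge: the rebuild loop computes rebuildF.
theorem pvRebuildLoop_eq (c : List Int) (d : PySem.Dict Int Int) (g : Int → Nat)
    (hd : ∀ v, d.getD v 0 = (g v : Int)) :
    pvRebuildLoop c d = rebuildF c g := by
  induction c generalizing d g with
  | nil => rfl
  | cons v rest ih =>
    simp only [pvRebuildLoop, rebuildF, hd v]
    have hcond : ((0 : Int) < (g v : Int)) ↔ (0 < g v) := by constructor <;> intro h <;> omega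
    split_ifs with h1 h2 h2
    · refine ih _ (decF g v) (fun w => ?_)
      simp only [PySem.Dict.getD_insert, decF, hd]
      split_ifs with hw
      · subst hw; have := hcond.mp h1; push_cast; omega
      · rfl
    · exact absurd (hcond.mp h1) h2
    · exact absurd (hcond.mpr h2) h1
    · exact congrArg _ (ih _ _ hd)

theorem rebuildF_zero (c : List Int) : rebuildF c (fun _ => 0) = c := by
  induction c with
  | nil => rfl
  | cons v rest ih => simpa [rebuildF] using ih

theorem count_rebuildF (c : List Int) (f : Int → Nat) (hle : ∀ v, f v ≤ c.count v) (t : Int) :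
    (rebuildF c f).count t = c.count t - f t := by
  induction c generalizing f with
  | nil =>
    have := hle t
    simp at this
    simp [rebuildF, this]
  | cons v rest ih =>
    simp only [rebuildF]
    split_ifs with hv
    · have hle' : ∀ w, decF f v w ≤ rest.count w := by
        intro w
        have h1 := hle w
        by_cases hw : w = v
        · subst hw; simp [decF]
          simp at h1
          omega
        · simp only [decF, if_neg hw]
          simp [List.count_cons, Ne.symm hw] at h1
          omega
      rw [ih (decF f v) hle']
      by_cases hTv : t = v
      · have h2 := hle v
        simp only [List.count_cons] at h2
        simp [hTv, decF, List.count_cons]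
        omega
      · simp only [decF, if_neg hTv]
        simp [List.count_cons, Ne.symm hTv]

    · have hfv : f v = 0 := by omega
      have hle' : ∀ w, f w ≤ rest.count w := by
        intro w
        have h1 := hle w
        by_cases hw : w = v
        · subst hw; rw [hfv]; exact Nat.zero_le _
        · simp [List.count_cons, Ne.symm hw] at h1
          omega
      simp only [List.count_cons, beq_iff_eq]
      rw [ih f hle']
      have := hle' t
      split_ifs with hTv
      · subst hTv; omega
      · omega

-- Decrement-then-increment at possibly different keys commutes (pointwise).
theorem incF_decF_comm (f : Int → Nat) (v t : Int) (hv : 0 < f v) :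
    ∀ w, incF (decF f v) t w = decF (incF f t) v w := by
  intro w
  simp only [incF, decF]
  split_ifs <;> subst_vars <;> omega

-- Erasing the first t from the rebuilt list = bumping the consumed count of t.
theorem erase_rebuildF (c : List Int) (f : Int → Nat) (t : Int) (h : f t < c.count t) :
    (rebuildF c f).erase t = rebuildF c (incF f t) := by
  induction c generalizing f with
  | nil => simp at h
  | cons v rest ih =>
    simp only [rebuildF]
    by_cases hv : 0 < f v
    · have hv' : 0 < incF f t v := by simp only [incF]; split_ifs <;> omega
      rw [if_pos hv, if_pos hv']
      have hlt : decF f v t < rest.count t := by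
        by_cases hvt : v = t
        · subst hvt
          simp [List.count_cons] at h
          simp [decF]
          omega
        · simp only [decF, if_neg (fun he : t = v => hvt he.symm)]
          simpa [List.count_cons, hvt] using h
      rw [ih (decF f v) hlt]
      exact rebuildF_congr _ _ _ (incF_decF_comm f v t hv)
    · rw [if_neg hv]
      have hfv : f v = 0 := by omega
      by_cases hvt : v = t
      · subst hvt
        have h1 : incF f v v = f v + 1 := by simp [incF]
        rw [if_pos (by omega : 0 < incF f v v)]
        rw [List.erase_cons_head]
        refine Eq.symm (rebuildF_congr _ _ _ ?_)
        intro w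
        simp only [decF, incF]
        split_ifs with hw <;> simp [hw, hfv]
      · have h2 : incF f t v = 0 := by simp [incF, hvt, hfv]
        rw [if_neg (by omega)]
        rw [List.erase_cons_tail (by simp [hvt])]
        have hlt : f t < rest.count t := by simpa [List.count_cons, hvt] using h
        rw [ih f hlt]

-- Main loop correspondence.
theorem pvRemoveLoop_rebuildF (c : List Int) (seq : List Int) (f : Int → Nat)
    (hle : ∀ v, f v ≤ c.count v) :
    pvRemoveLoop (rebuildF c f) seq = rebuildF c (consumeF (fun v => c.count v) f seq) := by
  induction seq generalizing f with
  | nil => rfl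
  | cons t rest ih =>
    simp only [pvRemoveLoop, consumeF]
    have hcount := count_rebuildF c f hle t
    by_cases hstop : c.count t < f t + 1
    · have hnotmem : t ∉ rebuildF c f := by
        intro hm
        have := List.count_pos_iff.mpr hm
        omega
      rw [if_pos (by simpa using hnotmem), if_pos hstop]
    · have hmem : t ∈ rebuildF c f := by
        apply List.count_pos_iff.mp
        omega
      rw [if_neg (by simpa using hmem), if_neg hstop]
      rw [PySem.List.remove?_eq_some_erase _ t hmem]
      simp only [Option.getD_some]
      rw [erase_rebuildF c f t (by omega)]
      refine ih (incF f t) (fun w => ?_)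
      simp only [incF]
      split_ifs with hw
      · subst hw; omega
      · exact hle w

theorem refine_one (c : List Int) (seq : List Int) :
    pvRemoveLoop c seq = pvRebuildLoop c (pvConsumeLoop (pvAvail c) PySem.Dict.empty seq) := by
  rw [pvRebuildLoop_eq c _ (consumeF (fun v => c.count v) (fun _ => 0) seq)
        (pvConsumeLoop_getD c seq PySem.Dict.empty (fun _ => 0) (fun v => by simp))]
  conv_lhs => rw [show c = rebuildF c (fun _ => 0) from (rebuildF_zero c).symm]
  exact pvRemoveLoop_rebuildF c seq (fun _ => 0) (fun v => Nat.zero_le _)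

-- ===== VERDICT (by name: the statement is the Claim_ definition above) =====
theorem refine_cluster_spec : Claim_equal_refine_cluster := by
  intro clustered_seqs sequence _
  unfold Spec_refine_cluster refine_cluster refine_cluster_alt
  exact List.map_congr_left (fun c _ => refine_one c sequence)
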